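-- pv_equiv track=rewrite | github.com/MiuselmianMV/PythonWeb | Hw1/Scripts/Screenshot3.py | SubExercise4
-- ===== SOURCE A (Python) =====
-- def SubExercise4(text:str)->None:
--     textSplit = text.split()
--     counter = 0
--     for index in range(len(textSplit)):
--         if (textSplit[index].endswith("!")
--         or textSplit[index] == "!"):
--             counter += 1
--
--     return counter
-- ===== SOURCE B (Python) =====
-- def SubExercise4(text: str) -> None:
--     # One pass over the characters, no word list: count a word-final exclamation mark
--     # whenever it is immediately followed by whitespace or the end of the text.
--     counter = 0
--     pending = False  # previous character was '!' (and not inside whitespace)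
--     for ch in text:
--         if ch.isspace():
--             if pending:
--                 counter += 1
--             pending = False
--         else:
--             pending = (ch == '!')
--     if pending:
--         counter += 1
--     return counter
-- ===== Notes on version B (the rewrite author's own statement) =====
-- stated objective: alternative
-- what changed: Replaces split()-then-scan (which materialises the whole word list) by a single character pass with a one-bit 'previous char was an exclamation mark' state, counting at each whitespace/end boundary; O(1) extra space instead of O(n).
import Mathlib
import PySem

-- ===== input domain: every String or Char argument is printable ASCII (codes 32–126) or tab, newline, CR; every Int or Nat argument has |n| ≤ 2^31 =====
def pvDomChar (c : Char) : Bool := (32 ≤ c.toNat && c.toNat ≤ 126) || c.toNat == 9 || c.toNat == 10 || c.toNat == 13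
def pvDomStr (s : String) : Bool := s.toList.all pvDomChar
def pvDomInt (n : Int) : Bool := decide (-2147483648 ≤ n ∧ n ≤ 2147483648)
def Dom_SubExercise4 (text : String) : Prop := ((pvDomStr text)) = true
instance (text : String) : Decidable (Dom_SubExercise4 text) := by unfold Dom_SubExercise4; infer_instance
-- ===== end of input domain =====

-- B replaces split()-then-scan by a single character pass with a one-bit state (O(1) extra space).

-- ===== PORT A =====
def SubExercise4 (text : String) : Int :=
  let textSplit := PySem.Str.split₀ text
  (PySem.List.pyRange 0 (PySem.List.len textSplit)).foldl
    (fun counter index =>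
      if PySem.Str.endswith (PySem.List.pyGetD textSplit index "") "!"
         || (PySem.List.pyGetD textSplit index "" == "!")
      then counter + 1 else counter) 0

-- ===== PORT B =====
def SubExercise4_alt (text : String) : Int :=
  let st := text.toList.foldl
    (fun (st : Int × Bool) ch =>
      if PySem.Chars.isspace ch then
        ((if st.2 then st.1 + 1 else st.1), false)
      else
        (st.1, ch == '!'))
    (0, false)
  if st.2 then st.1 + 1 else st.1

-- ===== PRECONDITION & SPEC =====
def Spec_SubExercise4 (text : String) (out : Int) : Prop := out = SubExercise4_alt text
instance (text : String) (out : Int) : Decidable (Spec_SubExercise4 text out) := by unfold Spec_SubExercise4; infer_instance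

-- ===== CLAIM (what is proved, stated in full; the proofs are below) =====
def Claim_equal_SubExercise4 : Prop := ∀ (text : String), Dom_SubExercise4 text → Spec_SubExercise4 text (SubExercise4 text)

-- ===== LEMMAS AND PROOFS =====

-- the word test A applies (on the character-list side)
def pvP (w : List Char) : Bool := PySem.Chars.endswith w ['!'] || (w == ['!'])

-- B's count, phrased on the remaining characters with the pending bit
def pvN : List Char → Bool → Int
  | [], b => if b then 1 else 0
  | ch :: rest, b =>
      if PySem.Chars.isspace ch then (if b then 1 else 0) + pvN rest false
      else pvN rest (ch == '!')

lemma pvP_reverse_cons (h : Char) (t : List Char) :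
    pvP (t.reverse ++ [h]) = (h == '!') := by
  have hsfx : (['!'] <:+ t.reverse ++ [h]) ↔ h = '!' := by
    constructor
    · rintro ⟨pre, hpre⟩
      have := congrArg List.getLast? hpre
      simpa [List.getLast?_append] using this.symm
    · rintro rfl; exact ⟨t.reverse, rfl⟩
  have hend : (['!'].isSuffixOf (t.reverse ++ [h])) = (h == '!') := by
    cases hb : (h == '!') <;> simp_all [Bool.eq_false_iff, List.isSuffixOf_iff_suffix]
  have hne : (t.reverse ++ [h] == ['!']) = true → (h == '!') = true := by
    intro he
    have : t.reverse ++ [h] = ['!'] := by simpa using he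
    have := congrArg List.getLast? this
    simp [List.getLast?_append] at this
    simp [this]
  simp only [pvP, PySem.Chars.endswith, hend]
  cases hb : (t.reverse ++ [h] == ['!'])
  · simp
  · simp [hne hb]

lemma go_count (s cur : List Char) (accs : List (List Char)) :
    ((PySem.Chars.split₀.go s cur accs).countP pvP : Int)
      = (accs.countP pvP : Int) + pvN s (cur.head? == some '!') := by
  induction s generalizing cur accs with
  | nil =>
      cases cur with
      | nil => simp [PySem.Chars.split₀.go, pvN]
      | cons h t =>
          rw [show PySem.Chars.split₀.go [] (h :: t) accs
              = ((h :: t).reverse :: accs).reverse from by simp [PySem.Chars.split₀.go]]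
          simp [List.countP_reverse, List.countP_cons, pvP_reverse_cons, pvN]
  | cons c rest ih =>
      by_cases hc : PySem.Chars.isspace c
      · cases cur with
        | nil =>
            rw [show PySem.Chars.split₀.go (c :: rest) [] accs
                = PySem.Chars.split₀.go rest [] accs from by simp [PySem.Chars.split₀.go, hc]]
            rw [ih]
            simp [pvN, hc]
        | cons h t =>
            rw [show PySem.Chars.split₀.go (c :: rest) (h :: t) accs
                = PySem.Chars.split₀.go rest [] ((h :: t).reverse :: accs) from by
                  simp [PySem.Chars.split₀.go, hc]]
            rw [ih]
            simp only [pvN, hc, if_true, List.countP_cons, List.reverse_cons,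
              pvP_reverse_cons, List.head?_cons]
            cases hb : (h == '!') <;> simp [hb] <;> try ring
      · rw [show PySem.Chars.split₀.go (c :: rest) cur accs
            = PySem.Chars.split₀.go rest (c :: cur) accs from by
              simp [PySem.Chars.split₀.go, hc]]
        rw [ih]
        simp [pvN, hc]

-- B's fold computes pvN
lemma alt_fold (s : List Char) (c : Int) (b : Bool) :
    (let st := s.foldl
        (fun (st : Int × Bool) ch =>
          if PySem.Chars.isspace ch then ((if st.2 then st.1 + 1 else st.1), false)
          else (st.1, ch == '!')) (c, b);
      if st.2 then st.1 + 1 else st.1) = c + pvN s b := by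
  induction s generalizing c b with
  | nil => cases b <;> simp [pvN]
  | cons ch rest ih =>
      by_cases hc : PySem.Chars.isspace ch
      · cases b <;> simp [List.foldl_cons, hc, ih, pvN] <;> try ring
      · simp [List.foldl_cons, hc, ih, pvN]

lemma ofList_beq_bang (w : List Char) : (String.ofList w == "!") = (w == ['!']) := by
  cases hb : (w == ['!'])
  · have hne : w ≠ ['!'] := by simpa using hb
    have hne' : String.ofList w ≠ "!" := fun he =>
      hne (by simpa using congrArg String.toList he)
    simpa [Bool.eq_false_iff] using hne'
  · have : w = ['!'] := by simpa using hb
    subst this; rfl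

lemma countP_split₀ (s : List Char) :
    ((PySem.Chars.split₀ s).countP pvP : Int) = pvN s false := by
  simpa [PySem.Chars.split₀] using go_count s [] []

-- ===== VERDICT (by name: the statement is the Claim_ definition above) =====
theorem SubExercise4_spec : Claim_equal_SubExercise4 := by
  intro text _
  show SubExercise4 text = SubExercise4_alt text
  rw [show SubExercise4 text = List.foldl
      (fun counter index =>
        if PySem.Str.endswith (PySem.List.pyGetD (PySem.Str.split₀ text) index "") "!"
           || (PySem.List.pyGetD (PySem.Str.split₀ text) index "" == "!")
        then counter + 1 else counter) 0
      (PySem.List.pyRange 0 (PySem.List.len (PySem.Str.split₀ text))) from rfl]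
  rw [PySem.List.foldl_pyRange_pyGetD (xs := PySem.Str.split₀ text) (d := "")
    (f := fun counter w =>
      if PySem.Str.endswith w "!" || (w == "!") then counter + 1 else counter)
    (init := (0 : Int)) (le_refl 0)]
  rw [PySem.List.foldl_if_add_one
    (p := fun w => PySem.Str.endswith w "!" || (w == "!"))]
  have hmap : (PySem.Str.split₀ text).countP
      (fun w => PySem.Str.endswith w "!" || (w == "!"))
      = (PySem.Chars.split₀ text.toList).countP pvP := by
    unfold PySem.Str.split₀
    rw [List.countP_map]
    apply List.countP_congr
    intro w _
    simp [pvP, Function.comp, ofList_beq_bang]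
  simp only [Int.toNat_zero, List.drop_zero]
  rw [hmap, countP_split₀]
  rw [show SubExercise4_alt text
      = (let st := text.toList.foldl
          (fun (st : Int × Bool) ch =>
            if PySem.Chars.isspace ch then ((if st.2 then st.1 + 1 else st.1), false)
            else (st.1, ch == '!')) (0, false);
        if st.2 then st.1 + 1 else st.1) from rfl]
  rw [alt_fold]
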